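-- pv_equiv track=rewrite | github.com/senatorous/cooky_analyst_sql_bot | bot.py | render_inline_table
-- ===== SOURCE A (Python) =====
-- from typing import Any
--
-- def render_inline_table(table_name: str, rows: list[dict[str, Any]], limit: int = 10) -> str:
--     if not rows:
--         return f"{table_name}\n(пусто)"
--
--     cols = list(rows[0].keys())
--     shown_rows = rows[:limit]
--     str_rows = [[str(r.get(c)) for c in cols] for r in shown_rows]
--     widths = [len(c) for c in cols]
--     for row in str_rows:
--         for i, cell in enumerate(row):
--             widths[i] = max(widths[i], len(cell))
--
--     header = " | ".join(cols[i].ljust(widths[i]) for i in range(len(cols)))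
--     sep = "-+-".join("-" * widths[i] for i in range(len(cols)))
--     body = "\n".join(
--         " | ".join(row[i].ljust(widths[i]) for i in range(len(cols))) for row in str_rows
--     )
--     trunc = ""
--     if len(rows) > limit:
--         trunc = f"\n... и еще {len(rows) - limit} строк"
--     return f"{table_name}\n{header}\n{sep}\n{body}{trunc}"
-- ===== SOURCE B (Python) =====
-- def render_inline_table(table_name: str, rows, limit: int = 10) -> str:
--     if not rows:
--         return f"{table_name}\n(пусто)"
--
--     cols = list(rows[0].keys())
--     shown = rows[:limit]
--     # single fused column-major pass: per column, compute its width and at once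
--     # append the padded header piece, the dash piece and every row's padded cell
--     # to growing line accumulators -- no widths list, no string matrix.
--     header = ""
--     sep = ""
--     body = [""] * len(shown)
--     glue = False
--     for c in cols:
--         cells = [str(r.get(c)) for r in shown]
--         w = max([len(c)] + [len(x) for x in cells])
--         gh = " | " if glue else ""
--         gs = "-+-" if glue else ""
--         header += gh + c.ljust(w)
--         sep += gs + "-" * w
--         body = [b + gh + x.ljust(w) for b, x in zip(body, cells)]
--         glue = True
--     out = table_name + "\n" + header + "\n" + sep + "\n" + "\n".join(body)
--     if len(rows) > limit:
--         out += f"\n... и еще {len(rows) - limit} строк"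
--     return out
-- ===== Notes on version B (the rewrite author's own statement) =====
-- stated objective: alternative
-- what changed: B replaces A's staged row-major pipeline (build the full string matrix, fold a widths list row by row, then render header/separator/body from that list) with one fused column-major pass that keeps no widths list and no string matrix: for each column it computes that column's width and immediately appends the padded header piece, the dash piece and every row's padded cell to growing per-line accumulators.
import Mathlib
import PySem

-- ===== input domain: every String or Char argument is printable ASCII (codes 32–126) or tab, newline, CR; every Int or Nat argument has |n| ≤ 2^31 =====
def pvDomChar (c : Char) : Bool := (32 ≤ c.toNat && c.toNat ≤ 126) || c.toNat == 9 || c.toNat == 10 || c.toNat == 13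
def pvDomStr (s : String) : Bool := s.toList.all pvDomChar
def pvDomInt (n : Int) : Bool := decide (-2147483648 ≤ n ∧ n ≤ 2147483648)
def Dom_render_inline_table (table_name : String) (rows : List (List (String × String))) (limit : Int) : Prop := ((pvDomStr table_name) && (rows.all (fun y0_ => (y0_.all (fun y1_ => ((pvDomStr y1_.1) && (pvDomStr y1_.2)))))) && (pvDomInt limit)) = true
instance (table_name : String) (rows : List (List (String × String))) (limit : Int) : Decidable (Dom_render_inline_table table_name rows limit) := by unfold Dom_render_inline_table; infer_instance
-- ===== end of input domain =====

-- B renders the table in ONE fused column-major pass (per column: width + padded pieces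
-- appended to growing line accumulators), instead of A's matrix + widths list + format stages.

-- len(s) (Nat-valued; Python's len is non-negative)
def pvLen (s : String) : Nat :=
  s.toList.length

-- str.ljust(w): pad with spaces on the right to width w (exact for every string)
def pvLjust (s : String) (w : Nat) : List Char :=
  s.toList ++ List.replicate (w - pvLen s) ' '

-- str(r.get(c)): the value, or "None" when the key is absent
def pvCell (r : List (String × String)) (c : String) : String :=
  match PySem.Dict.get? (PySem.Dict.ofList r) c with
  | some v => v
  | none => "None"

-- ===== PORT A =====
-- the per-cell width update of A's inner loop: widths[i] = max(widths[i], len(cell))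
def pvUpd (ws : List Nat) (p : String × Nat) : List Nat :=
  ws.set p.2 (max (ws.getD p.2 0) (pvLen p.1))

def render_inline_table (table_name : String) (rows : List (List (String × String))) (limit : Int) : String :=
  if rows.isEmpty then String.ofList (table_name.toList ++ "\n(пусто)".toList)
  else
    let cols : List String := PySem.Dict.keys (PySem.Dict.ofList (rows.headD []))
    let shown_rows := PySem.List.slice rows none (some limit)
    let str_rows : List (List String) := shown_rows.map (fun r => cols.map (fun c => pvCell r c))
    let widths0 : List Nat := cols.map (fun c => pvLen c)
    let widths : List Nat := str_rows.foldl (fun ws row => (row.zipIdx).foldl pvUpd ws) widths0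
    let header := PySem.Chars.join " | ".toList ((PySem.List.pyRange 0 (cols.length : Int) 1).map
      (fun i => pvLjust (PySem.List.pyGetD cols i "") (PySem.List.pyGetD widths i 0)))
    let sep := PySem.Chars.join "-+-".toList ((PySem.List.pyRange 0 (cols.length : Int) 1).map
      (fun i => List.replicate (PySem.List.pyGetD widths i 0) '-'))
    let body := PySem.Chars.join "\n".toList (str_rows.map (fun row =>
      PySem.Chars.join " | ".toList ((PySem.List.pyRange 0 (cols.length : Int) 1).map
        (fun i => pvLjust (PySem.List.pyGetD row i "") (PySem.List.pyGetD widths i 0)))))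
    let trunc : List Char :=
      if (rows.length : Int) > limit then
        "\n... и еще ".toList ++ PySem.Int.toChars ((rows.length : Int) - limit) ++ " строк".toList
      else []
    String.ofList (table_name.toList ++ '\n' :: header ++ '\n' :: sep ++ '\n' :: body ++ trunc)

-- ===== PORT B =====
-- the state of B's fused pass: (glue flag, header line, separator line, body lines)
def pvBState : Type := Bool × List Char × List Char × List (List Char)

-- one column of B's loop: compute the column's cells and width, append the padded
-- header piece, dash piece and each row's padded cell to the line accumulators
def pvBStep (shown : List (List (String × String))) (st : pvBState) (c : String) : pvBState :=
  let cells : List String := shown.map (fun r => pvCell r c)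
  let w : Nat := (PySem.List.max? (pvLen c :: cells.map pvLen) (fun x => x)).getD 0
  let gh : List Char := if st.1 then " | ".toList else []
  let gs : List Char := if st.1 then "-+-".toList else []
  (true, st.2.1 ++ gh ++ pvLjust c w, st.2.2.1 ++ gs ++ List.replicate w '-',
   (st.2.2.2.zip cells).map (fun p => p.1 ++ gh ++ pvLjust p.2 w))

def render_inline_table_alt (table_name : String) (rows : List (List (String × String))) (limit : Int) : String :=
  match rows with
  | [] => String.ofList (table_name.toList ++ "\n(пусто)".toList)
  | r0 :: _ =>
    let cols : List String := PySem.Dict.keys (PySem.Dict.ofList r0)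
    let shown := PySem.List.slice rows none (some limit)
    let st : pvBState := cols.foldl (pvBStep shown) (false, [], [], shown.map (fun _ => []))
    let out : List Char := table_name.toList ++ '\n' :: st.2.1 ++ '\n' :: st.2.2.1 ++
      '\n' :: PySem.Chars.join "\n".toList st.2.2.2
    let out := if (rows.length : Int) > limit then
        out ++ "\n... и еще ".toList ++ PySem.Int.toChars ((rows.length : Int) - limit) ++ " строк".toList
      else out
    String.ofList out

-- ===== PRECONDITION & SPEC =====
def Spec_render_inline_table (table_name : String) (rows : List (List (String × String))) (limit : Int) (out : String) : Prop := out = render_inline_table_alt table_name rows limit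
instance (table_name : String) (rows : List (List (String × String))) (limit : Int) (out : String) : Decidable (Spec_render_inline_table table_name rows limit out) := by unfold Spec_render_inline_table; infer_instance

-- ===== CLAIM =====
def Claim_equal_render_inline_table : Prop := ∀ (table_name : String) (rows : List (List (String × String))) (limit : Int), Dom_render_inline_table table_name rows limit → Spec_render_inline_table table_name rows limit (render_inline_table table_name rows limit)

-- ===== LEMMAS AND PROOFS =====

-- the per-column width both programs agree on
def pvW (shown : List (List (String × String))) (c : String) : Nat :=
  shown.foldl (fun a r => max a (pvLen (pvCell r c))) (pvLen c)

lemma pvUpd_shift (xs : List String) (k : Nat) (w : Nat) (t : List Nat) :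
    (xs.zipIdx (k+1)).foldl pvUpd (w :: t) = w :: (xs.zipIdx k).foldl pvUpd t := by
  induction xs generalizing k w t with
  | nil => simp
  | cons x xs ih =>
    simp only [List.zipIdx_cons, List.foldl_cons]
    have hstep : pvUpd (w :: t) (x, k + 1) = w :: pvUpd t (x, k) := by
      simp [pvUpd, List.set_cons_succ]
    rw [hstep, ih]

lemma pvRowStep (x : String) (xs : List String) (w : Nat) (t : List Nat) :
    ((x :: xs).zipIdx).foldl pvUpd (w :: t)
      = (max w (pvLen x)) :: (xs.zipIdx).foldl pvUpd t := by
  have h0 : pvUpd (w :: t) (x, 0) = (max w (pvLen x)) :: t := by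
    simp [pvUpd]
  simpa [List.zipIdx_cons, h0] using pvUpd_shift xs 0 (max w (pvLen x)) t

-- A's row-major fold splits off the first column
lemma pvSplit (rows : List (List String)) (h : ∀ r ∈ rows, r ≠ []) (w : Nat) (t : List Nat) :
    rows.foldl (fun ws row => (row.zipIdx).foldl pvUpd ws) (w :: t)
      = (rows.foldl (fun a row => max a (pvLen (row.headD ""))) w)
        :: (rows.map List.tail).foldl (fun ws row => (row.zipIdx).foldl pvUpd ws) t := by
  induction rows generalizing w t with
  | nil => simp
  | cons r rows ih =>
    obtain ⟨x, xs, rfl⟩ : ∃ x xs, r = x :: xs := by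
      cases r with
      | nil => exact absurd rfl (h _ (by simp))
      | cons x xs => exact ⟨x, xs, rfl⟩
    simp only [List.foldl_cons, List.map_cons, List.headD_cons, List.tail_cons]
    rw [pvRowStep]
    exact ih (fun r hr => h r (by simp [hr])) _ _

-- A's widths fold over the string matrix equals the per-column widths pvW
lemma pvWidths_eq (shown : List (List (String × String))) (cols : List String) :
    (shown.map (fun r => cols.map (fun c => pvCell r c))).foldl
        (fun ws row => (row.zipIdx).foldl pvUpd ws) (cols.map (fun c => pvLen c))
      = cols.map (pvW shown) := by
  induction cols with
  | nil =>
    simp only [List.map_nil]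
    induction shown with
    | nil => simp
    | cons a t ih => simpa using ih
  | cons c cs ih =>
    simp only [List.map_cons]
    have hne : ∀ r ∈ shown.map (fun r => pvCell r c :: cs.map (fun c => pvCell r c)), r ≠ [] := by
      intro r hr
      obtain ⟨r0, _, rfl⟩ := List.mem_map.mp hr
      simp
    rw [pvSplit _ hne]
    congr 1
    · rw [List.foldl_map]
      simp [pvW]
    · have : (shown.map (fun r => pvCell r c :: cs.map (fun c => pvCell r c))).map List.tail
          = shown.map (fun r => cs.map (fun c => pvCell r c)) := by
        simp
      rw [this]
      exact ih

-- indexed map over range(len xs) is a zip map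
lemma pvRangeZip {α β γ : Type} (f : α → β → γ) (d1 : α) (d2 : β) :
    ∀ (xs : List α) (ys : List β), xs.length ≤ ys.length →
    (PySem.List.pyRange 0 (xs.length : Int) 1).map
        (fun i => f (PySem.List.pyGetD xs i d1) (PySem.List.pyGetD ys i d2))
      = (xs.zip ys).map (fun p => f p.1 p.2) := by
  intro xs ys hlen
  rw [PySem.List.pyRange_zero_natCast, List.map_map]
  simp only [Function.comp_def, PySem.List.pyGetD_natCast]
  induction xs generalizing ys with
  | nil => simp
  | cons x xs ih =>
    cases ys with
    | nil => simp at hlen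
    | cons y ys =>
      simp only [List.length_cons]
      rw [List.range_succ_eq_map, List.map_cons, List.map_map]
      simp only [Function.comp_def, List.getD_cons_zero, List.getD_cons_succ, Nat.succ_eq_add_one]
      rw [List.zip_cons_cons, List.map_cons]
      congr 1
      exact ih ys (by simpa using hlen)

lemma pvRangeMap {α γ : Type} (g : α → γ) (d : α) (xs : List α) (n : Nat) (hn : n = xs.length) :
    (PySem.List.pyRange 0 (n : Int) 1).map (fun i => g (PySem.List.pyGetD xs i d))
      = xs.map g := by
  subst hn
  rw [PySem.List.pyRange_zero_natCast, List.map_map]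
  simp only [Function.comp_def, PySem.List.pyGetD_natCast]
  induction xs with
  | nil => simp
  | cons x t ih =>
    simp only [List.length_cons]
    rw [List.range_succ_eq_map, List.map_cons, List.map_map]
    simp only [Function.comp_def, List.getD_cons_zero, List.getD_cons_succ]
    simpa using ih

lemma pvZipSelfMap {α β : Type} (l : List α) (g : α → β) :
    l.zip (l.map g) = l.map (fun a => (a, g a)) := by
  induction l with
  | nil => rfl
  | cons x t ih => simp [ih]

-- join sep (x :: xs) written as x followed by glued pieces
lemma pvJoinCons (sep : List Char) (x : List Char) (xs : List (List Char)) :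
    PySem.Chars.join sep (x :: xs) = x ++ xs.flatMap (fun y => sep ++ y) := by
  induction xs generalizing x with
  | nil => simp [PySem.Chars.join_singleton]
  | cons y ys ih =>
    rw [PySem.Chars.join_cons_cons, ih y]
    simp

-- B's width equals pvW
lemma pvBW (shown : List (List (String × String))) (c : String) :
    (PySem.List.max? (pvLen c :: (shown.map (fun r => pvCell r c)).map pvLen)
        (fun x => x)).getD 0 = pvW shown c := by
  rw [PySem.List.max?_id_cons, Option.getD_some, List.foldl_map, List.foldl_map]
  rfl

-- invariant of B's fused pass, once the glue flag is set
lemma pvBFold (shown : List (List (String × String))) (cols : List String)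
    (h0 s0 : List Char) (f : List (String × String) → List Char) :
    cols.foldl (pvBStep shown) (true, h0, s0, shown.map f)
      = (true,
         h0 ++ cols.flatMap (fun c => " | ".toList ++ pvLjust c (pvW shown c)),
         s0 ++ cols.flatMap (fun c => "-+-".toList ++ List.replicate (pvW shown c) '-'),
         shown.map (fun r => f r ++ cols.flatMap (fun c => " | ".toList ++ pvLjust (pvCell r c) (pvW shown c)))) := by
  induction cols generalizing h0 s0 f with
  | nil => simp
  | cons c cs ih =>
    rw [List.foldl_cons]
    have hstep : pvBStep shown (true, h0, s0, shown.map f) c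
        = (true, h0 ++ " | ".toList ++ pvLjust c (pvW shown c),
           s0 ++ "-+-".toList ++ List.replicate (pvW shown c) '-',
           shown.map (fun r => f r ++ " | ".toList ++ pvLjust (pvCell r c) (pvW shown c))) := by
      simp only [pvBStep, pvBW, if_pos]
      rw [List.zip_map', List.map_map]
      rfl
    rw [hstep, ih]
    simp [List.flatMap_cons]

-- B's whole fold, from the initial (glue = false) state
lemma pvBFoldAll (shown : List (List (String × String))) (cols : List String) :
    cols.foldl (pvBStep shown) (false, [], [], shown.map (fun _ => []))
      = (cols != [],
         PySem.Chars.join " | ".toList (cols.map (fun c => pvLjust c (pvW shown c))),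
         PySem.Chars.join "-+-".toList (cols.map (fun c => List.replicate (pvW shown c) '-')),
         shown.map (fun r => PySem.Chars.join " | ".toList
           (cols.map (fun c => pvLjust (pvCell r c) (pvW shown c))))) := by
  cases cols with
  | nil => simp [PySem.Chars.join_nil]
  | cons c cs =>
    rw [List.foldl_cons]
    have hstep : pvBStep shown (false, [], [], shown.map (fun _ => [])) c
        = (true, pvLjust c (pvW shown c), List.replicate (pvW shown c) '-',
           shown.map (fun r => pvLjust (pvCell r c) (pvW shown c))) := by
      simp only [pvBStep, pvBW]
      rw [List.zip_map', List.map_map]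
      simp [Function.comp_def]
    rw [hstep, pvBFold]
    simp only [List.map_cons, pvJoinCons]
    simp only [List.flatMap_map]
    rfl

-- ===== VERDICT =====
theorem render_inline_table_spec : Claim_equal_render_inline_table := by
  intro table_name rows limit _hdom
  unfold Spec_render_inline_table
  cases rows with
  | nil => rfl
  | cons r0 rest =>
    rw [render_inline_table, render_inline_table_alt]
    simp only [List.isEmpty_cons, Bool.false_eq_true, if_false, List.headD_cons]
    set cols := PySem.Dict.keys (PySem.Dict.ofList r0) with hcols
    set shown := PySem.List.slice (r0 :: rest) none (some limit) with hshown
    rw [pvBFoldAll, pvWidths_eq shown cols]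
    have hheader :
        (PySem.List.pyRange 0 (cols.length : Int) 1).map
            (fun i => pvLjust (PySem.List.pyGetD cols i "")
              (PySem.List.pyGetD (cols.map (pvW shown)) i 0))
          = cols.map (fun c => pvLjust c (pvW shown c)) := by
      rw [pvRangeZip (fun a b => pvLjust a b) "" 0 cols (cols.map (pvW shown)) (by simp),
        pvZipSelfMap, List.map_map]
      simp [Function.comp_def]
    have hsep :
        (PySem.List.pyRange 0 (cols.length : Int) 1).map
            (fun i => List.replicate (PySem.List.pyGetD (cols.map (pvW shown)) i 0) '-')
          = cols.map (fun c => List.replicate (pvW shown c) '-') := by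
      rw [pvRangeMap (fun w => List.replicate w '-') 0 (cols.map (pvW shown)) cols.length (by simp),
        List.map_map]
      simp [Function.comp_def]
    have hbody : ∀ r : List (String × String),
        (PySem.List.pyRange 0 (cols.length : Int) 1).map
            (fun i => pvLjust (PySem.List.pyGetD (cols.map (fun c => pvCell r c)) i "")
              (PySem.List.pyGetD (cols.map (pvW shown)) i 0))
          = cols.map (fun c => pvLjust (pvCell r c) (pvW shown c)) := by
      intro r
      have hl : (cols.length : Int) = ((cols.map (fun c => pvCell r c)).length : Int) := by simp
      rw [hl, pvRangeZip (fun a b => pvLjust a b) "" 0 (cols.map (fun c => pvCell r c))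
          (cols.map (pvW shown)) (by simp), List.zip_map', List.map_map]
      simp [Function.comp_def]
    rw [hheader, hsep, List.map_map]
    simp only [Function.comp_def, hbody]
    split_ifs <;> simp
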